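-- pv_equiv track=rewrite | github.com/dfardis/idaes-pySTAR-fork | pySTAR/STEP_1.py | node_definer
-- ===== SOURCE A (Python) =====
-- def node_definer(depth):  # Index of the nodes
--     Nodes = [1]
--     TerminalNodes = []
--     Old_Level_Nodes = [1]
--     for level in range(1, depth + 1):
--         New_Level_Nodes = []
--         for node in Old_Level_Nodes:
--             New_Level_Nodes.append(2 * node)
--             New_Level_Nodes.append(2 * node + 1)
--         Nodes += New_Level_Nodes
--         if level != depth:
--             Old_Level_Nodes = New_Level_Nodes
--         else:
--             TerminalNodes += New_Level_Nodes
--     return Nodes, TerminalNodes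
-- ===== SOURCE B (Python) =====
-- def node_definer(depth):  # Index of the nodes
--     # Closed form: the full tree is the contiguous index range [1, 2**(depth+1)),
--     # and the terminal nodes are the last level [2**depth, 2**(depth+1)).
--     if depth < 1:
--         return [1], []
--     return list(range(1, 2 ** (depth + 1))), list(range(2 ** depth, 2 ** (depth + 1)))
-- ===== Notes on version B (the rewrite author's own statement) =====
-- stated objective: simpler
-- what changed: Replaces the per-level loops that double each node index with two closed-form range constructions: the whole contiguous node-index range and the last-level (terminal) range.
import Mathlib
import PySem

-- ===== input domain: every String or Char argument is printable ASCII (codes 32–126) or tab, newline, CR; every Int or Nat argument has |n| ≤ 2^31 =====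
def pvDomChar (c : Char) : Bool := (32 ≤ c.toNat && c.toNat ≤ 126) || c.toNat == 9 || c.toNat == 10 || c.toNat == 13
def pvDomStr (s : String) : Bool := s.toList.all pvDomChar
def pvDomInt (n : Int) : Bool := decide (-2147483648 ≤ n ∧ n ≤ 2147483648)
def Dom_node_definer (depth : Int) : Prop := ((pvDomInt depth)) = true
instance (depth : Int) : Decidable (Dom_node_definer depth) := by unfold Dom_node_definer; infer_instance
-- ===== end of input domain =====

-- B computes the node/terminal index lists in closed form as two contiguous ranges
-- instead of A's per-level doubling loops (objective: simpler).


-- ===== PORT A =====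
-- inner loop: for node in Old_Level_Nodes: append 2*node; append 2*node+1
def ndInner (old : List Int) : List Int :=
  old.foldl (fun acc node => (acc ++ [2 * node]) ++ [2 * node + 1]) []

def node_definer (depth : Int) : List Int × List Int :=
  let st := (PySem.List.pyRange 1 (depth + 1) 1).foldl
    (fun (st : List Int × List Int × List Int) level =>
      let new := ndInner st.2.2
      let nodes := st.1 ++ new
      if level ≠ depth then (nodes, st.2.1, new)
      else (nodes, st.2.1 ++ new, st.2.2))
    ([1], [], [1])
  (st.1, st.2.1)

-- ===== PORT B =====
def node_definer_alt (depth : Int) : List Int × List Int :=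
  if depth < 1 then ([1], [])
  else (PySem.List.pyRange 1 (2 ^ (depth + 1).toNat) 1,
        PySem.List.pyRange (2 ^ depth.toNat) (2 ^ (depth + 1).toNat) 1)

-- ===== PRECONDITION & SPEC =====
def Spec_node_definer (depth : Int) (out : List Int × List Int) : Prop := out = node_definer_alt depth
instance (depth : Int) (out : List Int × List Int) : Decidable (Spec_node_definer depth out) := by unfold Spec_node_definer; infer_instance

-- ===== CLAIM (what is proved, stated in full; the proofs are below) =====
def Claim_equal_node_definer : Prop := ∀ (depth : Int), Dom_node_definer depth → Spec_node_definer depth (node_definer depth)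

-- ===== LEMMAS AND PROOFS =====

-- the contiguous integer range [a, b) as a list
def ndRange (a b : Nat) : List Int := (List.range' a (b - a)).map Int.ofNat

lemma ndRange_eq_pyRange (a b : Nat) (h : a ≤ b) :
    ndRange a b = PySem.List.pyRange (a : Int) (b : Int) 1 := by
  rw [PySem.List.pyRange_one, ndRange, List.range'_eq_map_range]
  have : ((b : Int) - (a : Int)).toNat = b - a := by omega
  rw [this, List.map_map]
  exact List.map_congr_left (fun k _ => by simp)

lemma ndRange_append (a m b : Nat) (h1 : a ≤ m) (h2 : m ≤ b) :
    ndRange a m ++ ndRange m b = ndRange a b := by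
  unfold ndRange
  rw [← List.map_append]
  congr 1
  have h := List.range'_append (s := a) (m := m - a) (n := b - m) (step := 1)
  have e1 : a + 1 * (m - a) = m := by omega
  have e2 : m - a + (b - m) = b - a := by omega
  rw [e1, e2] at h
  exact h

lemma ndInner_flatMap (old : List Int) :
    ndInner old = old.flatMap (fun n => [2 * n, 2 * n + 1]) := by
  unfold ndInner
  have : (fun (acc : List Int) node => (acc ++ [2 * node]) ++ [2 * node + 1])
       = (fun (acc : List Int) node => acc ++ [2 * node, 2 * node + 1]) := by
    funext acc n; simp
  rw [this, PySem.List.foldl_append_eq_flatMap]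
  simp

lemma ndInner_range (a : Nat) : ∀ (len : Nat),
    ndInner ((List.range' a len).map Int.ofNat) = (List.range' (2 * a) (2 * len)).map Int.ofNat := by
  intro len
  induction len generalizing a with
  | zero => simp [ndInner]
  | succ n ih =>
    rw [List.range'_succ, List.map_cons, ndInner_flatMap, List.flatMap_cons,
      ← ndInner_flatMap, ih (a + 1)]
    have h2 : 2 * (n + 1) = 2 + 2 * n := by ring
    have h := List.range'_append (s := 2 * a) (m := 2) (n := 2 * n) (step := 1)
    have e1 : 2 * a + 1 * 2 = 2 * (a + 1) := by ring
    rw [e1] at h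
    rw [h2, ← h, List.map_append]
    have hhead : (List.range' (2 * a) 2).map Int.ofNat = [2 * (a : Int), 2 * (a : Int) + 1] := by
      simp [List.range', Int.ofNat_eq_natCast]
    rw [hhead]
    simp

lemma ndInner_ndRange (k : Nat) :
    ndInner (ndRange (2 ^ k) (2 ^ (k + 1))) = ndRange (2 ^ (k + 1)) (2 ^ (k + 2)) := by
  unfold ndRange
  have h1 : 2 ^ (k + 1) - 2 ^ k = 2 ^ k := by
    have := Nat.one_le_two_pow (n := k); rw [pow_succ]; omega
  have h2 : 2 ^ (k + 2) - 2 ^ (k + 1) = 2 ^ (k + 1) := by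
    have := Nat.one_le_two_pow (n := k + 1); rw [pow_succ 2 (k+1)]; omega
  rw [h1, h2, ndInner_range]
  have h3 : 2 * 2 ^ k = 2 ^ (k + 1) := by rw [pow_succ]; ring
  rw [h3]

-- the non-terminal loop step (the 'level != depth' branch of A's loop body)
def ndStep (st : List Int × List Int × List Int) : List Int × List Int × List Int :=
  (st.1 ++ ndInner st.2.2, st.2.1, ndInner st.2.2)

lemma ndLoop_inv : ∀ (k : Nat),
    (PySem.List.pyRange 1 (1 + (k : Int)) 1).foldl (fun st _ => ndStep st) ([1], [], [1])
      = (ndRange 1 (2 ^ (k + 1)), [], ndRange (2 ^ k) (2 ^ (k + 1))) := by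
  intro k
  induction k with
  | zero =>
    rw [PySem.List.pyRange_one_eq_nil (by omega)]
    simp [ndRange, List.range', Int.ofNat_eq_natCast]
  | succ n ih =>
    have : (1 : Int) + ((n : Nat) + 1 : Nat) = (1 + (n : Int)) + 1 := by push_cast; ring
    rw [this, PySem.List.pyRange_one_succ_right (by omega), List.foldl_append, ih]
    simp only [List.foldl_cons, List.foldl_nil, ndStep, ndInner_ndRange]
    refine Prod.ext ?_ (Prod.ext rfl rfl)
    exact ndRange_append 1 (2 ^ (n + 1)) (2 ^ (n + 2)) Nat.one_le_two_pow
      (Nat.pow_le_pow_right (by norm_num) (by omega))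

lemma node_definer_pos (d : Nat) (hd : 1 ≤ d) :
    node_definer (d : Int) = (ndRange 1 (2 ^ (d + 1)), ndRange (2 ^ d) (2 ^ (d + 1))) := by
  simp only [node_definer]
  have hsplit : (1 : Int) + (d : Int) = (1 + ((d - 1 : Nat) : Int)) + 1 := by omega
  have hrange : PySem.List.pyRange 1 ((d : Int) + 1) 1
      = PySem.List.pyRange 1 (1 + ((d - 1 : Nat) : Int)) 1 ++ [(1 + ((d - 1 : Nat) : Int))] := by
    rw [add_comm (d : Int) 1, hsplit]
    exact PySem.List.pyRange_one_succ_right (by omega)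
  rw [hrange, List.foldl_append]
  -- on the prefix every level is < d, so the 'level ≠ depth' branch is taken
  have hcongr : (PySem.List.pyRange 1 (1 + ((d - 1 : Nat) : Int)) 1).foldl
      (fun (st : List Int × List Int × List Int) level =>
        if level ≠ (d : Int) then (st.1 ++ ndInner st.2.2, st.2.1, ndInner st.2.2)
        else (st.1 ++ ndInner st.2.2, st.2.1 ++ ndInner st.2.2, st.2.2)) ([1], [], [1])
      = (PySem.List.pyRange 1 (1 + ((d - 1 : Nat) : Int)) 1).foldl
      (fun st _ => ndStep st) ([1], [], [1]) := by
    refine PySem.List.foldl_congr_mem _ _ _ _ ?_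
    intro acc x hx
    have hxd : x < 1 + ((d - 1 : Nat) : Int) := (PySem.List.mem_pyRange_one.mp hx).2
    have hne : x ≠ (d : Int) := by omega
    simp [hne, ndStep]
  rw [hcongr, ndLoop_inv (d - 1)]
  have hde : d - 1 + 1 = d := by omega
  rw [hde]
  have hlast : (1 + ((d - 1 : Nat) : Int)) = (d : Int) := by omega
  have hi := ndInner_ndRange (d - 1)
  rw [hde, show d - 1 + 2 = d + 1 by omega] at hi
  simp only [List.foldl_cons, List.foldl_nil, hlast, ite_not, if_true, hi, List.nil_append]
  exact Prod.ext (ndRange_append 1 (2 ^ d) (2 ^ (d + 1)) Nat.one_le_two_pow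
      (Nat.pow_le_pow_right (by norm_num) (by omega))) rfl

-- ===== VERDICT (by name: the statement is the Claim_ definition above) =====
theorem node_definer_spec : Claim_equal_node_definer := by
  intro depth _
  unfold Spec_node_definer
  by_cases h : depth < 1
  · -- loop body never runs; B's base case
    unfold node_definer node_definer_alt
    rw [PySem.List.pyRange_one_eq_nil (by omega), if_pos h]
    simp
  · replace h : 1 ≤ depth := by omega
    set d : Nat := depth.toNat with hd
    have hdepth : depth = (d : Int) := by omega
    have hd1 : 1 ≤ d := by omega
    rw [hdepth, node_definer_pos d hd1]
    unfold node_definer_alt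
    rw [if_neg (by omega)]
    have h1 : ((d : Int) + 1).toNat = d + 1 := by omega
    have h2 : ((d : Int)).toNat = d := by omega
    have e1 := ndRange_eq_pyRange 1 (2 ^ (d + 1)) Nat.one_le_two_pow
    have e2 := ndRange_eq_pyRange (2 ^ d) (2 ^ (d + 1))
        (Nat.pow_le_pow_right (by norm_num) (by omega))
    push_cast at e1 e2
    rw [h1, h2, ← e1, ← e2]
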